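-- pv_equiv track=rewrite | github.com/gjiabaozhou-cloud/Solitaire | lessons/06-game-model/deck.py | deal_tableau
-- ===== SOURCE A (Python) =====
-- from typing import List, Tuple
--
-- Card = Tuple[str, str]
--
-- def deal_tableau(deck: List[Card]):
--     piles: List[List[Card]] = []
--     offset = 0
--     for i in range(7):
--         count = i + 1
--         piles.append(deck[offset:offset + count])
--         offset += count
--     return piles, deck[offset:]
-- ===== SOURCE B (Python) =====
-- from typing import List, Tuple
--
-- Card = Tuple[str, str]
--
-- def deal_tableau(deck: List[Card]):
--     piles: List[List[Card]] = []
--     current: List[Card] = []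
--     cap = 1
--     stock: List[Card] = []
--     for card in deck:
--         if cap <= 7:
--             current.append(card)
--             if len(current) == cap:
--                 piles.append(current)
--                 current = []
--                 cap += 1
--         else:
--             stock.append(card)
--     if cap <= 7:
--         piles.append(current)
--     piles.extend([] for _ in range(7 - len(piles)))
--     return piles, stock
-- ===== Notes on version B (the rewrite author's own statement) =====
-- stated objective: alternative
-- what changed: B distributes cards one at a time in a single pass with a current-pile accumulator and capacity counter (overflow cards stream into the stock, then short piles are padded), instead of A's seven independent offset slices of the deck.
import Mathlib
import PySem

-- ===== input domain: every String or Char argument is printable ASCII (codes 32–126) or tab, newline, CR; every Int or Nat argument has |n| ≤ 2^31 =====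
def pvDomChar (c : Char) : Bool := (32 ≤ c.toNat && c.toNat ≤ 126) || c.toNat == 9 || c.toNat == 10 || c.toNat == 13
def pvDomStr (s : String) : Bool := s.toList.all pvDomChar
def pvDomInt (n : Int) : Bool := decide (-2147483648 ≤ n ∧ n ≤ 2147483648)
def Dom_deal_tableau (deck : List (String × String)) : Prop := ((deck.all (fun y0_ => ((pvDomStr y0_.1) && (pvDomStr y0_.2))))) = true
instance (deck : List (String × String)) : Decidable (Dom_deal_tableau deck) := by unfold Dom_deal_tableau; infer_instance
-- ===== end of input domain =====

-- B deals the deck card by card in one pass (current-pile accumulator, capacity counter, overflow to stock, short piles padded) instead of A's seven offset slices; alternative decomposition, same cost. Return value only; neither mutates.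

-- ===== PORT A =====
def deal_tableau (deck : List (String × String)) : (List (List (String × String))) × (List (String × String)) :=
  let st := (PySem.List.pyRange 0 7 1).foldl
    (fun (s : List (List (String × String)) × Int) i =>
      let count := i + 1
      (s.1 ++ [PySem.List.slice deck (some s.2) (some (s.2 + count))], s.2 + count))
    ([], 0)
  (st.1, PySem.List.slice deck (some st.2) none)

-- ===== PORT B =====
-- one loop over the deck; state = (finished piles, current pile, capacity of current pile, stock)
def dealStep (s : List (List (String × String)) × List (String × String) × Nat × List (String × String))
    (card : String × String) :
    List (List (String × String)) × List (String × String) × Nat × List (String × String) :=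
  let (piles, current, cap, stock) := s
  if cap ≤ 7 then
    let cur := current ++ [card]
    if cur.length == cap then (piles ++ [cur], [], cap + 1, stock)
    else (piles, cur, cap, stock)
  else (piles, current, cap, stock ++ [card])

def deal_tableau_alt (deck : List (String × String)) : (List (List (String × String))) × (List (String × String)) :=
  let st := deck.foldl dealStep ([], [], 1, [])
  let (piles, current, cap, stock) := st
  let piles := if cap ≤ 7 then piles ++ [current] else piles
  (piles ++ List.replicate (7 - piles.length) [], stock)

-- ===== PRECONDITION & SPEC =====
def Spec_deal_tableau (deck : List (String × String)) (out : (List (List (String × String))) × (List (String × String))) : Prop := out = deal_tableau_alt deck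
instance (deck : List (String × String)) (out : (List (List (String × String))) × (List (String × String))) : Decidable (Spec_deal_tableau deck out) := by unfold Spec_deal_tableau; infer_instance

-- ===== CLAIM (what is proved, stated in full; the proofs are below) =====
def Claim_equal_deal_tableau : Prop := ∀ (deck : List (String × String)), Dom_deal_tableau deck → Spec_deal_tableau deck (deal_tableau deck)

-- ===== LEMMAS AND PROOFS =====

theorem pyRange07 : PySem.List.pyRange 0 7 1 = [0, 1, 2, 3, 4, 5, 6] := by decide

-- once cap exceeds 7, the loop only appends to the stock
theorem stock_phase (deck : List (String × String)) :
    ∀ (piles : List (List (String × String))) (current : List (String × String))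
      (cap : Nat) (stock : List (String × String)), 7 < cap →
    deck.foldl dealStep (piles, current, cap, stock) = (piles, current, cap, stock ++ deck) := by
  induction deck with
  | nil => intro _ _ _ _ _; simp
  | cons a d ih =>
      intro piles current cap stock h
      have : dealStep (piles, current, cap, stock) a = (piles, current, cap, stock ++ [a]) := by
        simp [dealStep, Nat.not_le.mpr h]
      simp only [List.foldl_cons, this, ih _ _ _ _ h, List.append_assoc, List.singleton_append]

-- filling the current pile: the fold either stops inside this pile or completes it and continues
theorem fill_phase (deck : List (String × String)) :
    ∀ (current : List (String × String)) (cap : Nat)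
      (piles : List (List (String × String))) (stock : List (String × String)),
      cap ≤ 7 → current.length < cap →
    deck.foldl dealStep (piles, current, cap, stock) =
      if deck.length < cap - current.length
      then (piles, current ++ deck, cap, stock)
      else (deck.drop (cap - current.length)).foldl dealStep
             (piles ++ [current ++ deck.take (cap - current.length)], [], cap + 1, stock) := by
  induction deck with
  | nil =>
      intro current cap piles stock hcap hlt
      simp [Nat.sub_pos_of_lt hlt]
  | cons a d ih =>
      intro current cap piles stock hcap hlt
      by_cases hfull : current.length + 1 = cap
      · have step : dealStep (piles, current, cap, stock) a
            = (piles ++ [current ++ [a]], [], cap + 1, stock) := by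
          simp [dealStep, hcap, hfull]
        have hone : cap - current.length = 1 := by omega
        simp only [List.foldl_cons, step, hone, List.length_cons]
        rw [if_neg (by omega)]
        simp
      · have hlt' : (current ++ [a]).length < cap := by
          simp only [List.length_append, List.length_cons, List.length_nil]
          omega
        have step : dealStep (piles, current, cap, stock) a
            = (piles, current ++ [a], cap, stock) := by
          simp [dealStep, hcap]
          intro h; exact absurd (by omega : current.length + 1 = cap) hfull
        simp only [List.foldl_cons, step]
        rw [ih _ _ _ _ hcap hlt']
        have h1 : cap - (current ++ [a]).length = cap - current.length - 1 := by
          simp; omega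
        have h2 : (a :: d).length = d.length + 1 := by simp
        by_cases hc : d.length < cap - current.length - 1
        · rw [if_pos (by omega), if_pos (by omega)]
          simp
        · rw [if_neg (by omega), if_neg (by omega)]
          have htk : (a :: d).take (cap - current.length) = a :: d.take (cap - current.length - 1) := by
            cases h : cap - current.length with
            | zero => omega
            | succ k => simp
          have hdr : (a :: d).drop (cap - current.length) = d.drop (cap - current.length - 1) := by
            cases h : cap - current.length with
            | zero => omega
            | succ k => simp
          rw [h1, htk, hdr]
          simp

-- ===== VERDICT (by name: the statement is the Claim_ definition above) =====
theorem deal_tableau_spec : Claim_equal_deal_tableau := by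
  intro deck _
  unfold Spec_deal_tableau
  unfold deal_tableau deal_tableau_alt
  rw [pyRange07]
  simp only [List.foldl_cons, List.foldl_nil]
  rw [fill_phase deck [] 1 [] [] (by norm_num) (by simp)]
  rw [fill_phase _ [] 2 _ _ (by norm_num) (by simp)]
  rw [fill_phase _ [] 3 _ _ (by norm_num) (by simp)]
  rw [fill_phase _ [] 4 _ _ (by norm_num) (by simp)]
  rw [fill_phase _ [] 5 _ _ (by norm_num) (by simp)]
  rw [fill_phase _ [] 6 _ _ (by norm_num) (by simp)]
  rw [fill_phase _ [] 7 _ _ (by norm_num) (by simp)]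
  rw [stock_phase _ _ _ 8 _ (by norm_num)]
  norm_num [PySem.List.slice_toNat, PySem.List.slice_to, PySem.List.slice_from, List.drop_drop,
    show ((1:Int).toNat) = 1 from rfl, show ((3:Int).toNat) = 3 from rfl,
    show ((6:Int).toNat) = 6 from rfl, show ((10:Int).toNat) = 10 from rfl,
    show ((15:Int).toNat) = 15 from rfl, show ((21:Int).toNat) = 21 from rfl,
    show ((28:Int).toNat) = 28 from rfl]
  split_ifs with h1 h2 h3 h4 h5 h6 h7 <;>
    simp_all [List.drop_eq_nil_iff, List.drop_one] <;>
    constructor <;>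
    try (first
      | (apply List.take_of_length_le; simp only [List.length_drop]; omega)
      | (apply List.drop_eq_nil_of_le; omega)
      | omega)
  all_goals exact Nat.le_of_lt_succ (by omega)
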